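-- pv_equiv track=rewrite | github.com/bharadwajvyadavalli/coding-patterns | stack_problems.py | check_if_word_is_valid_after_substitutions
-- ===== SOURCE A (Python) =====
-- def check_if_word_is_valid_after_substitutions(s):
--     """LC 1003 - Stack for abc validation"""
--     stack = []
--
--     for char in s:
--         stack.append(char)
--         if len(stack) >= 3 and stack[-3:] == ['a', 'b', 'c']:
--             stack.pop()
--             stack.pop()
--             stack.pop()
--
--     return len(stack) == 0
-- ===== SOURCE B (Python) =====
-- def check_if_word_is_valid_after_substitutions(s):
--     """LC 1003 - repeatedly erase 'abc' substrings; valid iff nothing remains"""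
--     while 'abc' in s:
--         s = s.replace('abc', '')
--     return s == ''
-- ===== Notes on version B (the rewrite author's own statement) =====
-- stated objective: simpler
-- what changed: Replaced the character-by-character stack with a whole-string rewriting loop that repeatedly deletes every occurrence of the pattern via str.replace until none remains, then tests emptiness; correctness rests on confluence of the rewrite rather than on stack state.
import Mathlib
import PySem

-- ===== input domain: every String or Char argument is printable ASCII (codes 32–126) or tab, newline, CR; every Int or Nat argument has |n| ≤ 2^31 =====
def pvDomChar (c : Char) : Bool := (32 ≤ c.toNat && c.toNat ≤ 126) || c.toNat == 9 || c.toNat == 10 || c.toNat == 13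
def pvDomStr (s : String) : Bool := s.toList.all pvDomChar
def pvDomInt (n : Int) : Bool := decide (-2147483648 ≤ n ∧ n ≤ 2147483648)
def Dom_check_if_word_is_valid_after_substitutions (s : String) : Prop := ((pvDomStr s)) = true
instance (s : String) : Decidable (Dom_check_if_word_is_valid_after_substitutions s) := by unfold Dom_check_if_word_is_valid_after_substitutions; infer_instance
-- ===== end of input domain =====

-- B replaces the stack with a repeated 'abc'-erasing rewrite loop (simpler: shorter and plainer; a timing run measured it faster via C-level str.replace).

-- ===== PORT A =====
-- one body of A's for-loop: push char, then pop three if the top three are 'a','b','c'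
def pvStepA (stack : List Char) (char : Char) : List Char :=
  let stack := stack ++ [char]
  if 3 ≤ stack.length ∧ PySem.List.slice stack (some (-3)) none = ['a', 'b', 'c'] then
    ((stack.dropLast).dropLast).dropLast
  else stack

def check_if_word_is_valid_after_substitutions (s : String) : Bool :=
  let stack := s.toList.foldl pvStepA []
  stack.length == 0

-- ===== PORT B =====
-- what one s.replace('abc','') pass does, as a list recursion (used only to justify termination)
def pvRAbc : List Char → List Char
  | 'a' :: 'b' :: 'c' :: t => pvRAbc t
  | c :: t => c :: pvRAbc t
  | [] => []

theorem pvRAbc_cons {c : Char} {t : List Char} (hp : ¬ ['a','b','c'] <+: (c :: t)) :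
    pvRAbc (c :: t) = c :: pvRAbc t := by
  refine pvRAbc.eq_2 c t ?_
  intro t1 h1 h2
  exact hp (by subst h1; subst h2; exact ⟨t1, rfl⟩)

theorem pvGo_eq (fuel : Nat) : ∀ (l acc : List Char), l.length ≤ fuel →
    PySem.Chars.replace.go ['a','b','c'] [] fuel l acc = acc.reverse ++ pvRAbc l := by
  induction fuel with
  | zero =>
    intro l acc h
    have hl : l = [] := List.length_eq_zero_iff.mp (by omega)
    subst hl
    rw [PySem.Chars.replace.go, pvRAbc]
  | succ n ih =>
    intro l acc h
    match l with
    | [] =>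
      rw [PySem.Chars.replace.go]
      · rw [pvRAbc]; simp
      · omega
    | c :: t =>
      rw [PySem.Chars.replace.go]
      by_cases hp : List.isPrefixOf ['a','b','c'] (c :: t)
      · rw [if_pos hp]
        obtain ⟨t', ht⟩ := List.isPrefixOf_iff_prefix.mp hp
        have hct : c :: t = 'a'::'b'::'c'::t' := ht.symm
        rw [hct]
        have hr : pvRAbc ('a'::'b'::'c'::t') = pvRAbc t' := by rw [pvRAbc]
        rw [hr]
        have hlen : t'.length ≤ n := by
          have h1 := congrArg List.length hct
          simp at h1 h ⊢
          omega
        simpa using ih t' acc hlen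
      · rw [if_neg hp]
        have hlen : t.length ≤ n := by simp at h; omega
        rw [ih t (c :: acc) hlen,
            pvRAbc_cons (fun hpre => hp (List.isPrefixOf_iff_prefix.mpr hpre))]
        simp

-- one Python replace('abc','') pass is exactly pvRAbc
theorem pvReplace_toList (s : String) :
    (PySem.Str.replace s "abc" "").toList = pvRAbc s.toList := by
  rw [PySem.Str.toList_replace, PySem.Chars.replace]
  simp only [show ("abc" : String).toList = ['a','b','c'] from rfl,
             show ("" : String).toList = [] from rfl]
  rw [if_neg (by simp)]
  simpa using pvGo_eq s.toList.length s.toList [] le_rfl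

theorem pvRAbc_length_le (l : List Char) : (pvRAbc l).length ≤ l.length := by
  induction l using pvRAbc.induct with
  | case1 t ih => rw [pvRAbc]; simp; omega
  | case2 c t hg ih => rw [pvRAbc.eq_2 c t hg]; simpa using ih
  | case3 => simp [pvRAbc]

-- a pass over a string containing 'abc' strictly shrinks it (termination of the while loop)
theorem pvRAbc_length_lt {l : List Char} (h : ['a','b','c'] <:+: l) :
    (pvRAbc l).length < l.length := by
  induction l using pvRAbc.induct with
  | case1 t ih =>
    rw [pvRAbc]
    have := pvRAbc_length_le t
    simp; omega
  | case2 c t hg ih =>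
    rw [pvRAbc.eq_2 c t hg]
    have ht : ['a','b','c'] <:+: t := by
      rcases List.infix_cons_iff.mp h with hpre | hinf
      · exfalso
        obtain ⟨t', ht'⟩ := hpre
        injection ht' with h1 h2
        exact hg t' h1.symm h2.symm
      · exact hinf
    simpa using ih ht
  | case3 => simp at h

-- while 'abc' in s: s = s.replace('abc', '')
def pvLoopB (s : String) : String :=
  if PySem.Str.isIn "abc" s then pvLoopB (PySem.Str.replace s "abc" "") else s
termination_by s.toList.length
decreasing_by
  rename_i h
  rw [pvReplace_toList]
  exact pvRAbc_length_lt ((PySem.Str.isIn_iff_infix _ _).mp h)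

def check_if_word_is_valid_after_substitutions_alt (s : String) : Bool :=
  pvLoopB s == ""

-- ===== PRECONDITION & SPEC =====
def Spec_check_if_word_is_valid_after_substitutions (s : String) (out : Bool) : Prop := out = check_if_word_is_valid_after_substitutions_alt s
instance (s : String) (out : Bool) : Decidable (Spec_check_if_word_is_valid_after_substitutions s out) := by unfold Spec_check_if_word_is_valid_after_substitutions; infer_instance

-- ===== CLAIM (what is proved, stated in full; the proofs are below) =====
def Claim_equal_check_if_word_is_valid_after_substitutions : Prop := ∀ (s : String), Dom_check_if_word_is_valid_after_substitutions s → Spec_check_if_word_is_valid_after_substitutions s (check_if_word_is_valid_after_substitutions s)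

-- ===== LEMMAS AND PROOFS =====

-- pushing a non-'c' char never pops
theorem pvStepA_push {st : List Char} {c : Char} (hc : c ≠ 'c') :
    pvStepA st c = st ++ [c] := by
  unfold pvStepA
  rw [if_neg]
  rintro ⟨hlen, hsl⟩
  rw [PySem.List.slice_from_neg_ofNat _ 3 (by omega)] at hsl
  have hsuf : ['a','b','c'] <:+ (st ++ [c]) := hsl ▸ (List.drop_suffix _ _)
  obtain ⟨p, hp⟩ := hsuf
  have h2 : (p ++ ['a','b']) ++ ['c'] = st ++ [c] := by simpa using hp
  have h3 := (List.append_inj' h2 rfl).2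
  simp at h3
  exact hc h3.symm

-- feeding 'a','b','c' from any stack returns to that stack
theorem pvStepA_abc (st : List Char) :
    pvStepA (pvStepA (pvStepA st 'a') 'b') 'c' = st := by
  have ha : pvStepA st 'a' = st ++ ['a'] := pvStepA_push (by decide)
  have hb : pvStepA (st ++ ['a']) 'b' = st ++ ['a','b'] := by
    rw [pvStepA_push (by decide)]; simp
  rw [ha, hb]
  unfold pvStepA
  have he : (st ++ ['a','b']) ++ ['c'] = st ++ ['a','b','c'] := by simp
  rw [he, if_pos]
  · have hcc : st ++ ['a','b','c'] = (((st.concat 'a').concat 'b').concat 'c') := by simp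
    rw [hcc]
    simp
  constructor
  · simp
  · rw [PySem.List.slice_from_neg_ofNat _ 3 (by omega)]
    simp

-- erasing one pass of occurrences does not change A's final stack
theorem pvFoldl_rAbc (st : List Char) (l : List Char) :
    List.foldl pvStepA st (pvRAbc l) = List.foldl pvStepA st l := by
  induction l using pvRAbc.induct generalizing st with
  | case1 t ih =>
    rw [pvRAbc]
    simp only [List.foldl]
    rw [pvStepA_abc, ih]
  | case2 c t hg ih =>
    rw [pvRAbc.eq_2 c t hg]
    simp only [List.foldl]
    rw [ih]
  | case3 => rfl

-- a string with no 'abc' substring passes through the stack untouched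
theorem pvFoldl_noAbc (st : List Char) (l : List Char)
    (h : ¬ ['a','b','c'] <:+: (st ++ l)) :
    List.foldl pvStepA st l = st ++ l := by
  induction l generalizing st with
  | nil => simp
  | cons c t ih =>
    have hstep : pvStepA st c = st ++ [c] := by
      unfold pvStepA
      rw [if_neg]
      rintro ⟨hlen, hsl⟩
      rw [PySem.List.slice_from_neg_ofNat _ 3 (by omega)] at hsl
      apply h
      have hsuf : ['a','b','c'] <:+ (st ++ [c]) := hsl ▸ (List.drop_suffix _ _)
      have hpre : (st ++ [c]) <+: (st ++ c :: t) := by simp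
      exact (hsuf.isInfix).trans hpre.isInfix
    simp only [List.foldl]
    rw [hstep, ih (st ++ [c]) (by simpa using h)]
    simp
  
theorem pvLoopB_stack (s : String) :
    List.foldl pvStepA [] (pvLoopB s).toList = List.foldl pvStepA [] s.toList := by
  unfold pvLoopB
  split
  · rw [pvLoopB_stack (PySem.Str.replace s "abc" ""), pvReplace_toList, pvFoldl_rAbc]
  · rfl
termination_by s.toList.length
decreasing_by
  rename_i h
  rw [pvReplace_toList]
  exact pvRAbc_length_lt ((PySem.Str.isIn_iff_infix _ _).mp h)

theorem pvLoopB_noAbc (s : String) :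
    ¬ ['a','b','c'] <:+: (pvLoopB s).toList := by
  unfold pvLoopB
  split
  · exact pvLoopB_noAbc (PySem.Str.replace s "abc" "")
  · rename_i h
    intro hinf
    exact h ((PySem.Str.isIn_iff_infix "abc" s).mpr (by simpa using hinf))
termination_by s.toList.length
decreasing_by
  rename_i h
  rw [pvReplace_toList]
  exact pvRAbc_length_lt ((PySem.Str.isIn_iff_infix _ _).mp h)

-- ===== VERDICT (by name: the statement is the Claim_ definition above) =====
theorem check_if_word_is_valid_after_substitutions_spec : Claim_equal_check_if_word_is_valid_after_substitutions := by
  intro s _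
  unfold Spec_check_if_word_is_valid_after_substitutions
  unfold check_if_word_is_valid_after_substitutions check_if_word_is_valid_after_substitutions_alt
  have h1 := pvLoopB_stack s
  have h2 := pvFoldl_noAbc [] (pvLoopB s).toList (by simpa using pvLoopB_noAbc s)
  simp only [List.nil_append] at h2
  rw [← h1, h2]
  rcases heq : pvLoopB s == "" with _ | _
  · have hne : pvLoopB s ≠ "" := by simpa using heq
    have : (pvLoopB s).toList ≠ [] := fun hnil =>
      hne (String.toList_inj.mp (by simpa using hnil))
    simpa using this
  · have he : pvLoopB s = "" := by simpa using heq
    rw [he]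
    rfl
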